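-- pv_equiv track=rewrite | github.com/rachit1994/ai-agent-generator | src/scale_out_api_mcp_plugin_platform_features/feature_13_sandbox_hardening_egress_cgroups_limits/runtime.py | _valid_egress_allowlist
-- ===== SOURCE A (Python) =====
-- from typing import Any
--
-- def _valid_egress_allowlist(value: Any) -> bool:
--     if not isinstance(value, list) or not value:
--         return False
--     seen: set[str] = set()
--     for host in value:
--         if not isinstance(host, str):
--             return False
--         normalized = host.strip()
--         if not normalized or "." not in normalized or " " in normalized:
--             return False
--         if normalized in seen:
--             return False
--         seen.add(normalized)
--     return True
-- ===== SOURCE B (Python) =====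
-- def _valid_egress_allowlist(value) -> bool:
--     if not isinstance(value, list) or not value:
--         return False
--     if any(not isinstance(h, str) for h in value):
--         return False
--     normalized = sorted(h.strip() for h in value)
--     for prev, cur in zip(normalized, normalized[1:]):
--         if prev == cur:
--             return False
--     return all(s and "." in s and " " not in s for s in normalized)
-- ===== Notes on version B (the rewrite author's own statement) =====
-- stated objective: alternative
-- what changed: Replaces A's single pass with a mutable hash set and interleaved early returns by sort-then-scan: sort the stripped hostnames and detect duplicates by comparing adjacent elements, then run the per-hostname validity checks as a separate final pass over the sorted list.
import Mathlib
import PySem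

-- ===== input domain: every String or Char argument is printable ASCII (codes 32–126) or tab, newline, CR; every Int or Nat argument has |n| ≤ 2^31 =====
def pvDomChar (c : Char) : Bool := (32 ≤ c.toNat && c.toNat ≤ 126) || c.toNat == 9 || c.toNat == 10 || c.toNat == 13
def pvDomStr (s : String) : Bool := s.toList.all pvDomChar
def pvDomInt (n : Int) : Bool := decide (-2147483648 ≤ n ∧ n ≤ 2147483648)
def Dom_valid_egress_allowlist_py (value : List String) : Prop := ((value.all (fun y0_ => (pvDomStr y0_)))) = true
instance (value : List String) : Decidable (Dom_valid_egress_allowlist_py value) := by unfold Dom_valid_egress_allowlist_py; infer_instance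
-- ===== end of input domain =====

-- B replaces A's one-pass hash-set duplicate detection by sort-then-adjacent-scan over the
-- stripped hostnames, with the validity checks as a separate final pass (objective: alternative).


-- ===== PORT A =====
-- Port of A: one loop over the hosts carrying the mutable `seen` set, four early returns.
def pvALoop : List String → PySem.Set String → Bool
  | [], _ => true
  | host :: rest, seen =>
    let normalized := PySem.Str.strip host
    if normalized = "" || !(PySem.Str.isIn "." normalized) || PySem.Str.isIn " " normalized then
      false
    else if PySem.Set.contains seen normalized then
      false
    else
      pvALoop rest (PySem.Set.add seen normalized)

def valid_egress_allowlist_py (value : List String) : Bool :=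
  if value = [] then false else pvALoop value PySem.Set.empty

-- ===== PORT B =====
-- B: non-empty guard; sort the stripped hostnames; scan adjacent pairs for a duplicate;
-- then one final validity pass over the sorted list.
def pvOkN (s : String) : Bool :=
  !(s = "") && PySem.Str.isIn "." s && !(PySem.Str.isIn " " s)

def valid_egress_allowlist_py_alt (value : List String) : Bool :=
  if value = [] then false
  else
    let normalized := PySem.List.sorted (value.map PySem.Str.strip) (fun s => s) false
    if (normalized.zip normalized.tail).any (fun p => p.1 == p.2) then false
    else normalized.all pvOkN

-- ===== PRECONDITION & SPEC =====
def Spec_valid_egress_allowlist_py (value : List String) (out : Bool) : Prop := out = valid_egress_allowlist_py_alt value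
instance (value : List String) (out : Bool) : Decidable (Spec_valid_egress_allowlist_py value out) := by unfold Spec_valid_egress_allowlist_py; infer_instance

-- ===== CLAIM (what is proved, stated in full; the proofs are below) =====
def Claim_equal_valid_egress_allowlist_py : Prop := ∀ (value : List String), Dom_valid_egress_allowlist_py value → Spec_valid_egress_allowlist_py value (valid_egress_allowlist_py value)

-- ===== LEMMAS AND PROOFS =====

-- A's first early-return condition is the negation of the per-host validity test on the stripped host.
lemma pvCond_eq_not_pvOkN (h : String) :
    (decide (PySem.Str.strip h = "") || !(PySem.Str.isIn "." (PySem.Str.strip h))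
      || PySem.Str.isIn " " (PySem.Str.strip h)) = !pvOkN (PySem.Str.strip h) := by
  simp [pvOkN, Bool.or_assoc]

-- Characterisation of A's loop: it succeeds iff every stripped host passes the validity test,
-- the stripped hosts are pairwise distinct, and none of them is already in `seen`.
lemma pvALoop_true_iff (xs : List String) (seen : PySem.Set String) :
    pvALoop xs seen = true ↔
      ((xs.map PySem.Str.strip).all pvOkN = true ∧ (xs.map PySem.Str.strip).Nodup ∧
        ∀ s ∈ xs.map PySem.Str.strip, s ∉ seen) := by
  induction xs generalizing seen with
  | nil => simp [pvALoop]
  | cons h t ih =>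
    rw [show pvALoop (h :: t) seen =
        (if !pvOkN (PySem.Str.strip h) then false
         else if PySem.Set.contains seen (PySem.Str.strip h) then false
         else pvALoop t (PySem.Set.add seen (PySem.Str.strip h))) from by
      simp only [pvALoop]; rw [pvCond_eq_not_pvOkN]]
    cases hbok : pvOkN (PySem.Str.strip h) with
    | false => simp [hbok]
    | true =>
      rw [Bool.not_true, if_neg (by simp)]
      by_cases hm : PySem.Str.strip h ∈ seen
      · have hc : PySem.Set.contains seen (PySem.Str.strip h) = true := by
          simpa [PySem.Set.contains] using hm
        rw [if_pos hc]
        constructor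
        · intro hfalse; cases hfalse
        · rintro ⟨-, -, hnin⟩
          exact absurd hm (hnin _ (by simp))
      · have hc : PySem.Set.contains seen (PySem.Str.strip h) = false := by
          simpa [PySem.Set.contains] using hm
        rw [if_neg (fun hcc => hm (by simpa [PySem.Set.contains] using hcc)), ih]
        simp only [List.all_cons, List.map_cons, List.nodup_cons, List.mem_cons,
          Bool.and_eq_true]
        constructor
        · rintro ⟨hall, hnd, hnin⟩
          refine ⟨⟨hbok, hall⟩, ⟨?_, hnd⟩, ?_⟩
          · intro hmem
            have := hnin _ hmem
            simp [PySem.Set.mem_add] at this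
          · rintro s (rfl | hs)
            · exact hm
            · intro hin
              have := hnin s hs
              rw [PySem.Set.mem_add] at this
              exact this (Or.inl hin)
        · rintro ⟨⟨-, hall⟩, ⟨hh, hnd⟩, hnin⟩
          refine ⟨hall, hnd, ?_⟩
          intro s hs
          rw [PySem.Set.mem_add]
          rintro (hin | rfl)
          · exact hnin s (Or.inr hs) hin
          · exact hh hs

-- On a (weakly) sorted list, the adjacent-pair scan finds no equal pair iff the list has no duplicates.
lemma pvAdj_nodup (l : List String) (hle : l.Pairwise (· ≤ ·)) :
    ((l.zip l.tail).any (fun p => p.1 == p.2) = false) ↔ l.Nodup := by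
  induction l with
  | nil => simp
  | cons a t ih =>
    cases t with
    | nil => simp
    | cons b u =>
      have hab : a ≤ b := (List.pairwise_cons.mp hle).1 b (by simp)
      have htail : (b :: u).Pairwise (· ≤ ·) := (List.pairwise_cons.mp hle).2
      have hbu : ∀ x ∈ u, b ≤ x := fun x hx => (List.pairwise_cons.mp htail).1 x hx
      have ih' := ih htail
      simp only [List.tail_cons] at ih'
      simp only [List.zip_cons_cons, List.tail_cons, List.any_cons, Bool.or_eq_false_iff,
        beq_eq_false_iff_ne, ne_eq, ih', List.nodup_cons]
      constructor
      · rintro ⟨hne, hnotbu, hnd⟩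
        have halt : a < b := lt_of_le_of_ne hab hne
        refine ⟨?_, hnotbu, hnd⟩
        simp only [List.mem_cons]
        rintro (rfl | hmem)
        · exact absurd halt (lt_irrefl a)
        · exact absurd (lt_of_lt_of_le halt (hbu a hmem)) (lt_irrefl a)
      · rintro ⟨hnotmem, hnotbu, hnd⟩
        exact ⟨fun hab' => hnotmem (hab' ▸ List.mem_cons_self), hnotbu, hnd⟩

-- ===== VERDICT (by name: the statement is the Claim_ definition above) =====
theorem valid_egress_allowlist_py_spec : Claim_equal_valid_egress_allowlist_py := by
  intro value _
  unfold Spec_valid_egress_allowlist_py valid_egress_allowlist_py valid_egress_allowlist_py_alt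
  by_cases hnil : value = []
  · simp [hnil]
  · rw [if_neg hnil, if_neg hnil, Bool.eq_iff_iff, pvALoop_true_iff]
    set st := value.map PySem.Str.strip with hst
    set sl := PySem.List.sorted st (fun s => s) false with hsl
    have hperm : sl.Perm st := PySem.List.sorted_perm st (fun s => s) false
    have hle : sl.Pairwise (· ≤ ·) := PySem.List.sorted_pairwise st (fun s => s)
    have hallEq : sl.all pvOkN = st.all pvOkN := by
      rw [Bool.eq_iff_iff]; simp only [List.all_eq_true]
      constructor
      · intro hall s hs; exact hall s (hperm.mem_iff.mpr hs)
      · intro hall s hs; exact hall s (hperm.mem_iff.mp hs)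
    have hndEq : sl.Nodup ↔ st.Nodup := hperm.nodup_iff
    constructor
    · rintro ⟨hall, hnd, -⟩
      have hadj : (sl.zip sl.tail).any (fun p => p.1 == p.2) = false :=
        (pvAdj_nodup sl hle).mpr (hndEq.mpr hnd)
      rw [if_neg (by rw [hadj]; exact Bool.false_ne_true)]
      rw [hallEq]; exact hall
    · intro hb
      by_cases hadj : (sl.zip sl.tail).any (fun p => p.1 == p.2) = true
      · rw [if_pos hadj] at hb; cases hb
      · rw [if_neg hadj] at hb
        have hnd := (pvAdj_nodup sl hle).mp (Bool.eq_false_iff.mpr hadj)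
        refine ⟨hallEq ▸ hb, hndEq.mp hnd, ?_⟩
        intro s _ hin
        simp [PySem.Set.empty] at hin
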